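-- pv_equiv track=rewrite | github.com/rdapaz/attack_path_web | backend/app/services/pipeline.py | _expand_token
-- ===== SOURCE A (Python) =====
-- def _expand_token(token: str, ag: dict[str, list[str]],
--                   seen: frozenset | None = None) -> list[str]:
--     if seen is None:
--         seen = frozenset()
--     if not token.startswith("AG-"):
--         return [token]
--     if token in seen or token not in ag:
--         return [token]
--     new_seen = seen | {token}
--     leaves: list[str] = []
--     for member in ag[token]:
--         leaves.extend(_expand_token(member, ag, new_seen))
--     return leaves
-- ===== SOURCE B (Python) =====
-- def _expand_token(token: str, ag: dict[str, list[str]],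
--                   seen: frozenset | None = None) -> list[str]:
--     base = frozenset() if seen is None else seen
--     out: list[str] = []
--     frames: list[list[str]] = [[token]]   # stack of pending-member frames (top = last)
--     path: list[str] = []                  # tokens opened on the current expansion path
--     while frames:
--         top = frames[-1]
--         if not top:
--             frames.pop()
--             if path:
--                 path.pop()
--             continue
--         tok = top[0]
--         frames[-1] = top[1:]
--         if tok.startswith("AG-") and tok not in base and tok not in path and tok in ag:
--             path.append(tok)
--             frames.append(list(ag[tok]))
--         else:
--             out.append(tok)
--     return out
-- ===== Notes on version B (the rewrite author's own statement) =====
-- stated objective: alternative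
-- what changed: Replaces the recursion carrying a per-call frozenset by an iterative DFS over a stack of pending-member frames plus a single current-path list (seen = initial seen union path), popping one frame and one path entry together when a group's members are exhausted.
import Mathlib
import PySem

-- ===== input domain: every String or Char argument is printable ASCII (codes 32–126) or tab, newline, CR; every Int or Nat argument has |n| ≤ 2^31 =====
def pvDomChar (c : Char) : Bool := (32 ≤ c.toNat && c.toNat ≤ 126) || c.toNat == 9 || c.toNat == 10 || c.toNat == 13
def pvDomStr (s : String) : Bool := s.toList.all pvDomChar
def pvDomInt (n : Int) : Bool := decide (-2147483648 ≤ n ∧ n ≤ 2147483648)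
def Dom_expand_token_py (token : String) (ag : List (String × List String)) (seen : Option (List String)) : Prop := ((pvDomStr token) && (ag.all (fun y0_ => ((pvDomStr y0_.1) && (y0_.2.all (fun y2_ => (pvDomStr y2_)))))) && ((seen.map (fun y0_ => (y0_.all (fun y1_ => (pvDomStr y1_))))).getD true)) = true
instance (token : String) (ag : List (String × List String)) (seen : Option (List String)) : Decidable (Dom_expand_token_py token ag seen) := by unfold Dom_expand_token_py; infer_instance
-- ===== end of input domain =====

-- B replaces A's recursion (per-call seen set) by an iterative DFS over a stack of pending-member
-- frames plus a single current-path list (seen = initial seen ∪ path); objective: alternative.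

-- ===== PORT A =====
-- first-match association-list lookup: Python ag[token] (used only where 'token in ag' holds)
def pvLookup (ag : List (String × List String)) (t : String) : List String :=
  match ag.find? (fun p => p.1 == t) with
  | some pr => pr.2
  | none => []

-- termination measure: number of ag keys not yet in seen
def pvRem (ag : List (String × List String)) (s : List String) : Nat :=
  ((ag.map Prod.fst).filter (fun k => !s.contains k)).length

theorem pv_filter_le {α : Type} (l : List α) (p q : α → Bool)
    (h : ∀ x, q x = true → p x = true) : (l.filter q).length ≤ (l.filter p).length := by
  induction l with
  | nil => simp
  | cons a t ih =>
    simp only [List.filter_cons]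
    cases hq : q a with
    | true => simp [h a hq]; omega
    | false => cases hp : p a <;> simp <;> omega

theorem pv_filter_lt {α : Type} (l : List α) (p q : α → Bool)
    (h : ∀ x, q x = true → p x = true) (t : α) (ht : t ∈ l)
    (hp : p t = true) (hq : q t = false) :
    (l.filter q).length < (l.filter p).length := by
  induction l with
  | nil => simp at ht
  | cons a rest ih =>
    simp only [List.filter_cons]
    rcases List.mem_cons.mp ht with rfl | htr
    · have := pv_filter_le rest p q h
      simp [hp, hq]; omega
    · have := ih htr
      cases hqa : q a with
      | true => simp [h a hqa]; omega
      | false => cases hpa : p a <;> simp <;> omega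

theorem pv_rem_lt (ag : List (String × List String)) (s : List String) (tok : String)
    (hmem : tok ∈ ag.map Prod.fst) (hs : s.contains tok = false) :
    pvRem ag (PySem.Set.union s [tok]) < pvRem ag s := by
  unfold pvRem
  refine pv_filter_lt _ _ _ ?_ tok hmem ?_ ?_
  · intro x hx
    cases hxc : s.contains x with
    | false => rfl
    | true =>
      have hxs : x ∈ s := List.contains_iff_mem.mp hxc
      have hxu : x ∈ (PySem.Set.union s [tok] : List String) :=
        (PySem.Set.mem_union _ _ _).mpr (Or.inl hxs)
      rw [List.contains_iff_mem.mpr hxu] at hx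
      simp at hx
  · rw [hs]; rfl
  · have htu : tok ∈ (PySem.Set.union s [tok] : List String) :=
      (PySem.Set.mem_union _ _ _).mpr (Or.inr (by simp))
    rw [List.contains_iff_mem.mpr htu]; rfl

theorem pv_find?_mem_keys {ag : List (String × List String)} {tok : String}
    (h : (ag.find? (fun p => p.1 == tok)).isSome = true) : tok ∈ ag.map Prod.fst := by
  rcases Option.isSome_iff_exists.mp h with ⟨pr, hf⟩
  have hm := List.mem_of_find?_eq_some hf
  have hp : pr.1 = tok := by simpa using List.find?_some hf
  exact hp ▸ List.mem_map_of_mem hm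

-- port of A: literal recursion; seen is the frozenset (non-None) the Python recursion carries
def pvExpandA (token : String) (ag : List (String × List String)) (seen : List String) :
    List String :=
  if !(PySem.Str.startswith token "AG-") then [token]
  else if seen.contains token || !((ag.find? (fun p => p.1 == token)).isSome) then [token]
  else
    let new_seen := PySem.Set.union seen [token]
    (pvLookup ag token).foldl (fun acc m => acc ++ pvExpandA m ag new_seen) []
termination_by pvRem ag seen
decreasing_by
  rename_i _h1 h2
  simp only [Bool.or_eq_true, not_or, Bool.not_eq_true', Bool.not_eq_true, Bool.not_eq_false] at h2
  exact pv_rem_lt ag seen token (pv_find?_mem_keys h2.2) h2.1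

def expand_token_py (token : String) (ag : List (String × List String))
    (seen : Option (List String)) : List String :=
  pvExpandA token ag (match seen with | none => PySem.Set.empty | some s => s)

-- ===== PORT B =====
-- Python 'tok in ag' / 'ag[tok]' as one first-match scan returning Option
def pvMembers : List (String × List String) → String → Option (List String)
  | [], _ => none
  | (k, v) :: rest, t => if k == t then some v else pvMembers rest t

-- B's termination measure: keys of ag neither in the initial seen nor on the current path
def pvRemB (ag : List (String × List String)) (base p : List String) : Nat :=
  ((ag.map Prod.fst).filter (fun k => !(base.contains k || p.contains k))).length

def pvWB (ag : List (String × List String)) : Nat :=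
  (ag.map (fun pr => pr.2.length)).sum + 2

-- weight of a frame stack: each frame's tokens weighted by the depth budget left below its path
def pvMu (ag : List (String × List String)) (base : List String) :
    List (List String) → List String → Nat
  | [], _ => 0
  | f :: fr, p => 1 + f.length * pvWB ag ^ (pvRemB ag base p + 1) + pvMu ag base fr p.tail

theorem pvMembers_isSome_mem {ag : List (String × List String)} {tok : String}
    (h : (pvMembers ag tok).isSome = true) : tok ∈ ag.map Prod.fst := by
  induction ag with
  | nil => simp [pvMembers] at h
  | cons a rest ih =>
    obtain ⟨k, v⟩ := a
    by_cases hk : (k == tok) = true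
    · exact List.mem_map.mpr ⟨(k, v), by simp, by simpa using hk⟩
    · simp only [pvMembers, if_neg hk] at h
      exact List.mem_cons_of_mem _ (ih h)

theorem pvMembers_getD_len_le (ag : List (String × List String)) (tok : String) :
    ((pvMembers ag tok).getD []).length ≤ (ag.map (fun pr => pr.2.length)).sum := by
  induction ag with
  | nil => simp [pvMembers]
  | cons a rest ih =>
    obtain ⟨k, v⟩ := a
    by_cases hk : (k == tok) = true
    · simp [pvMembers, hk]
    · simp only [pvMembers, List.map_cons, List.sum_cons]
      rw [if_neg hk]
      omega

theorem pv_remB_lt (ag : List (String × List String)) (base p : List String) (tok : String)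
    (hmem : tok ∈ ag.map Prod.fst) (hb : base.contains tok = false)
    (hp : p.contains tok = false) :
    pvRemB ag base (tok :: p) < pvRemB ag base p := by
  unfold pvRemB
  refine pv_filter_lt _ _ _ ?_ tok hmem ?_ ?_
  · intro x hx
    simp only [Bool.not_eq_true', Bool.or_eq_false_iff] at hx ⊢
    refine ⟨hx.1, ?_⟩
    have := hx.2
    simp only [List.contains_cons, Bool.or_eq_false_iff] at this
    exact this.2
  · show (!(base.contains tok || p.contains tok)) = true
    rw [hb, hp]; rfl
  · show (!(base.contains tok || (tok :: p).contains tok)) = false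
    simp

-- port of B: the while loop; frames is the stack of pending-member frames (head = top),
-- p is the current expansion path (head = most recently opened token)
def pvStepB (ag : List (String × List String)) (base : List String) :
    List (List String) → List String → List String → List String
  | [], _, out => out
  | [] :: fr, p, out => pvStepB ag base fr p.tail out
  | (tok :: rest) :: fr, p, out =>
    if h : (PySem.Str.startswith tok "AG-" && !base.contains tok && !p.contains tok
            && (pvMembers ag tok).isSome) = true then
      pvStepB ag base (((pvMembers ag tok).getD []) :: rest :: fr) (tok :: p) out
    else
      pvStepB ag base (rest :: fr) p (out ++ [tok])
termination_by frames p _ => pvMu ag base frames p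
decreasing_by
  · simp [pvMu]
  · simp only [Bool.and_eq_true, Bool.not_eq_true'] at h
    obtain ⟨⟨⟨_hsw, hb⟩, hp⟩, hfind⟩ := h
    have hrem : pvRemB ag base (tok :: p) < pvRemB ag base p :=
      pv_remB_lt ag base p tok (pvMembers_isSome_mem hfind) hb hp
    have hmlen : ((pvMembers ag tok).getD []).length ≤ pvWB ag - 2 := by
      have := pvMembers_getD_len_le ag tok
      unfold pvWB; omega
    have hW : 2 ≤ pvWB ag := by unfold pvWB; omega
    have hpow1 : 1 ≤ pvWB ag ^ (pvRemB ag base p) := Nat.one_le_pow _ _ (by omega)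
    have hpowle : pvWB ag ^ (pvRemB ag base (tok :: p) + 1) ≤ pvWB ag ^ (pvRemB ag base p) :=
      Nat.pow_le_pow_right (by omega) (by omega)
    have hmul : ((pvMembers ag tok).getD []).length * pvWB ag ^ (pvRemB ag base (tok :: p) + 1)
        ≤ (pvWB ag - 2) * pvWB ag ^ (pvRemB ag base p) :=
      Nat.mul_le_mul hmlen hpowle
    have hsplit : (pvWB ag - 2) * pvWB ag ^ (pvRemB ag base p) + 2 * pvWB ag ^ (pvRemB ag base p)
        = pvWB ag ^ (pvRemB ag base p + 1) := by
      rw [← Nat.add_mul, Nat.sub_add_cancel hW, pow_succ, Nat.mul_comm]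
    simp only [pvMu, List.length_cons, List.tail_cons, Nat.add_mul, Nat.one_mul]
    omega
  · have hpow1 : 1 ≤ pvWB ag ^ (pvRemB ag base p + 1) := Nat.one_le_pow _ _ (by
      unfold pvWB; omega)
    simp only [pvMu, List.length_cons, Nat.add_mul, Nat.one_mul]
    omega

def expand_token_py_alt (token : String) (ag : List (String × List String))
    (seen : Option (List String)) : List String :=
  pvStepB ag (match seen with | none => PySem.Set.empty | some s => s) [[token]] [] []

-- ===== PRECONDITION & SPEC =====
def Spec_expand_token_py (token : String) (ag : List (String × List String)) (seen : Option (List String)) (out : List String) : Prop := out = expand_token_py_alt token ag seen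
instance (token : String) (ag : List (String × List String)) (seen : Option (List String)) (out : List String) : Decidable (Spec_expand_token_py token ag seen out) := by unfold Spec_expand_token_py; infer_instance

-- ===== CLAIM =====
def Claim_equal_expand_token_py : Prop := ∀ (token : String) (ag : List (String × List String)) (seen : Option (List String)), Dom_expand_token_py token ag seen → Spec_expand_token_py token ag seen (expand_token_py token ag seen)

-- ===== LEMMAS AND PROOFS =====
theorem pvMembers_eq_find (ag : List (String × List String)) (t : String) :
    pvMembers ag t = (ag.find? (fun pr => pr.1 == t)).map Prod.snd := by
  induction ag with
  | nil => simp [pvMembers]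
  | cons a rest ih =>
    obtain ⟨k, v⟩ := a
    by_cases hk : (k == t) = true
    · simp [pvMembers, hk]
    · simp only [pvMembers, List.find?_cons]
      rw [if_neg hk, ih]
      simp [hk]

theorem pvMembers_getD_eq (ag : List (String × List String)) (t : String) :
    (pvMembers ag t).getD [] = pvLookup ag t := by
  rw [pvMembers_eq_find]
  unfold pvLookup
  cases ag.find? (fun pr => pr.1 == t) <;> rfl

theorem pvMembers_isSome_eq (ag : List (String × List String)) (t : String) :
    (pvMembers ag t).isSome = (ag.find? (fun pr => pr.1 == t)).isSome := by
  rw [pvMembers_eq_find]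
  cases ag.find? (fun pr => pr.1 == t) <;> rfl

theorem pv_contains_eq_of_mem_iff {s s' : List String}
    (h : ∀ x, x ∈ s ↔ x ∈ s') (x : String) : s.contains x = s'.contains x := by
  rw [Bool.eq_iff_iff]
  constructor <;> intro hc
  · exact List.contains_iff_mem.mpr ((h x).mp (List.contains_iff_mem.mp hc))
  · exact List.contains_iff_mem.mpr ((h x).mpr (List.contains_iff_mem.mp hc))

theorem pv_flatMap_congr {α β : Type} (l : List α) (f g : α → List β)
    (h : ∀ x ∈ l, f x = g x) : l.flatMap f = l.flatMap g := by
  induction l with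
  | nil => rfl
  | cons a t ih =>
    simp only [List.flatMap_cons]
    rw [h a (by simp), ih (fun x hx => h x (by simp [hx]))]

-- A's result depends on the seen set only through membership
theorem pvExpandA_congr (ag : List (String × List String)) :
    ∀ (n : Nat) (t : String) (s s' : List String),
    pvRem ag s = n → (∀ x, s.contains x = s'.contains x) →
    pvExpandA t ag s = pvExpandA t ag s' := by
  intro n
  induction n using Nat.strong_induction_on with
  | _ n ih =>
    intro t s s' hn h
    rw [pvExpandA, pvExpandA, h t]
    split
    · rfl
    · split
      · rfl
      · rename_i hsw hguard
        simp only [Bool.or_eq_true, not_or, Bool.not_eq_true', Bool.not_eq_true,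
          Bool.not_eq_false] at hguard
        obtain ⟨hcon', hfind⟩ := hguard
        have hcon : s.contains t = false := by rw [h t]; exact hcon'
        have hlt : pvRem ag (PySem.Set.union s [t]) < n :=
          hn ▸ pv_rem_lt ag s t (pv_find?_mem_keys hfind) hcon
        have hmemiff : ∀ x, x ∈ (PySem.Set.union s [t] : List String)
            ↔ x ∈ (PySem.Set.union s' [t] : List String) := by
          intro x
          rw [PySem.Set.mem_union, PySem.Set.mem_union]
          constructor <;> intro hx <;> rcases hx with hx | hx
          · exact Or.inl (List.contains_iff_mem.mp (by rw [← h x]; exact List.contains_iff_mem.mpr hx))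
          · exact Or.inr hx
          · exact Or.inl (List.contains_iff_mem.mp (by rw [h x]; exact List.contains_iff_mem.mpr hx))
          · exact Or.inr hx
        show List.foldl (fun acc m => acc ++ pvExpandA m ag (PySem.Set.union s [t])) []
              (pvLookup ag t)
            = List.foldl (fun acc m => acc ++ pvExpandA m ag (PySem.Set.union s' [t])) []
              (pvLookup ag t)
        apply PySem.List.foldl_congr_mem
        intro acc m _
        rw [ih _ hlt m (PySem.Set.union s [t]) (PySem.Set.union s' [t]) rfl
          (pv_contains_eq_of_mem_iff hmemiff)]

-- contains on (union base (tok::p)) agrees with contains on (union (union base p) [tok])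
theorem pv_union_shift (base p : List String) (tok : String) :
    ∀ x, List.contains (PySem.Set.union (PySem.Set.union base p) [tok]) x
      = List.contains (PySem.Set.union base (tok :: p)) x := by
  intro x
  refine pv_contains_eq_of_mem_iff (fun y => ?_) x
  rw [PySem.Set.mem_union, PySem.Set.mem_union, PySem.Set.mem_union]
  simp only [List.mem_cons]
  tauto

-- the recursion A performs when a group token is opened
theorem pvExpandA_open (ag : List (String × List String)) (base p : List String) (tok : String)
    (hsw : PySem.Str.startswith tok "AG-" = true)
    (hb : base.contains tok = false) (hp : p.contains tok = false)
    (hfind : (pvMembers ag tok).isSome = true) :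
    pvExpandA tok ag (PySem.Set.union base p) =
      ((pvMembers ag tok).getD []).flatMap
        (fun m => pvExpandA m ag (PySem.Set.union base (tok :: p))) := by
  have hfind' : (ag.find? (fun pr => pr.1 == tok)).isSome = true := by
    rw [← pvMembers_isSome_eq]; exact hfind
  have hmemno : tok ∉ (PySem.Set.union base p : List String) := by
    intro hmem
    rcases (PySem.Set.mem_union _ _ _).mp hmem with hm | hm
    · rw [List.contains_iff_mem.mpr hm] at hb; simp at hb
    · rw [List.contains_iff_mem.mpr hm] at hp; simp at hp
  have hc : List.contains (PySem.Set.union base p) tok = false := by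
    cases hcc : List.contains (PySem.Set.union base p) tok with
    | false => rfl
    | true => exact absurd (List.contains_iff_mem.mp hcc) hmemno
  rw [pvExpandA, if_neg (by rw [hsw]; decide), if_neg (by rw [hc, hfind']; decide)]
  show (pvLookup ag tok).foldl
      (fun acc m => acc ++ pvExpandA m ag (PySem.Set.union (PySem.Set.union base p) [tok])) []
      = _
  rw [PySem.List.foldl_append_eq_flatMap, List.nil_append, pvMembers_getD_eq]
  refine pv_flatMap_congr _ _ _ (fun m _ => ?_)
  exact pvExpandA_congr ag _ m _ _ rfl (pv_union_shift base p tok)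

-- A yields the token itself whenever B's guard is false
theorem pvExpandA_closed (ag : List (String × List String)) (base p : List String) (tok : String)
    (h : (PySem.Str.startswith tok "AG-" && !base.contains tok && !p.contains tok
          && (pvMembers ag tok).isSome) = false) :
    pvExpandA tok ag (PySem.Set.union base p) = [tok] := by
  rw [pvExpandA]
  by_cases hsw : PySem.Str.startswith tok "AG-" = true
  · rw [if_neg (by rw [hsw]; decide)]
    rw [hsw] at h
    simp only [Bool.true_and, Bool.and_eq_false_iff,
      Bool.not_eq_false'] at h
    have hcond : (List.contains (PySem.Set.union base p) tok
        || !((ag.find? (fun pr => pr.1 == tok)).isSome)) = true := by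
      rcases h with (hb | hp) | hf
      · have hm : tok ∈ (PySem.Set.union base p : List String) :=
          (PySem.Set.mem_union _ _ _).mpr (Or.inl (List.contains_iff_mem.mp hb))
        rw [List.contains_iff_mem.mpr hm]; rfl
      · have hm : tok ∈ (PySem.Set.union base p : List String) :=
          (PySem.Set.mem_union _ _ _).mpr (Or.inr (List.contains_iff_mem.mp hp))
        rw [List.contains_iff_mem.mpr hm]; rfl
      · rw [pvMembers_isSome_eq] at hf
        rw [hf]
        cases List.contains (PySem.Set.union base p) tok <;> rfl
    rw [if_pos hcond]
  · rw [if_pos (by rw [Bool.not_eq_true] at hsw; rw [hsw]; decide)]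

-- what B's loop still has to emit: each frame expanded under the path it was opened below
def pvE (ag : List (String × List String)) (base : List String) :
    List (List String) → List String → List String
  | [], _ => []
  | f :: fr, p =>
      f.flatMap (fun m => pvExpandA m ag (PySem.Set.union base p)) ++ pvE ag base fr p.tail

-- loop invariant: B's loop returns out ++ the pending expansions
theorem pvStepB_eq (ag : List (String × List String)) (base : List String) :
    ∀ frames p out, pvStepB ag base frames p out = out ++ pvE ag base frames p := by
  intro frames p out
  fun_induction pvStepB ag base frames p out with
  | case1 p out => simp [pvE]
  | case2 fr p out ih => rw [ih]; simp [pvE]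
  | case3 tok rest fr p out h ih =>
    rw [ih]
    simp only [pvE, List.tail_cons]
    simp only [Bool.and_eq_true, Bool.not_eq_true'] at h
    obtain ⟨⟨⟨hsw, hb⟩, hp⟩, hfind⟩ := h
    rw [List.flatMap_cons, pvExpandA_open ag base p tok hsw hb hp hfind]
    simp
  | case4 tok rest fr p out h ih =>
    rw [ih]
    simp only [pvE, List.flatMap_cons]
    rw [pvExpandA_closed ag base p tok (by simpa using h)]
    simp

-- ===== VERDICT =====
theorem expand_token_py_spec : Claim_equal_expand_token_py := by
  intro token ag seen _
  unfold Spec_expand_token_py expand_token_py expand_token_py_alt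
  rw [pvStepB_eq]
  simp only [pvE, List.flatMap_cons, List.flatMap_nil, List.append_nil, List.nil_append]
  refine (pvExpandA_congr ag _ token _ _ rfl (fun x => ?_)).symm
  refine pv_contains_eq_of_mem_iff (fun y => ?_) x
  rw [PySem.Set.mem_union]
  simp
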